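-- pv_equiv track=rewrite | github.com/Vettel12/recursion | J.py | solution
-- ===== SOURCE A (Python) =====
-- def solution(n, k):
--     if n == 1:
--         return '0'
--     half_length = 2 ** (n - 2)
--     if k <= half_length:
--         return solution(n - 1, k)
--     else:
--         return '1' if solution(n - 1, k - half_length) == '0' else '0'
-- ===== SOURCE B (Python) =====
-- def solution(n, k):
--     flips = 0
--     for i in range(n - 2, -1, -1):
--         half = 1 << i
--         if k > half:
--             k -= half
--             flips = 1 - flips
--     return '1' if flips else '0'
-- ===== Notes on version B (the rewrite author's own statement) =====
-- stated objective: faster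
-- what changed: Replaces A's n-deep halve-and-flip recursion by a single iterative descent over the construction levels that accumulates a flip parity; Pre_ only excludes n < 1, where A recurses forever (RecursionError).
import Mathlib
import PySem

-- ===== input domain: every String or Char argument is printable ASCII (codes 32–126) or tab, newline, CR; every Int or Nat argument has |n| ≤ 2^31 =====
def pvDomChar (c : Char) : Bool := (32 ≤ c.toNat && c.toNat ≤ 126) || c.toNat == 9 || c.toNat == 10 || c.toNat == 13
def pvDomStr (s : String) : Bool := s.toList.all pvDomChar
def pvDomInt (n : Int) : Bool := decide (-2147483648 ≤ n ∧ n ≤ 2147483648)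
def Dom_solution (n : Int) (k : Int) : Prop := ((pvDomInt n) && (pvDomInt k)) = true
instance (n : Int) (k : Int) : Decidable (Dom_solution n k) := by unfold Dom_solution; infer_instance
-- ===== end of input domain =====

-- B replaces A's n-deep recursion by one iterative descent accumulating a flip parity.

-- ===== PORT A =====
-- literal transliteration of A's recursion; the extra 'n ≤ 1' guard only makes the
-- recursion total in Lean (for n ≤ 0 Python A recurses forever — excluded by Pre_solution)
def solution (n : Int) (k : Int) : String :=
  if n = 1 then "0"
  else if n ≤ 1 then "0"
  else
    let half_length : Int := 2 ^ (n - 2).toNat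
    if k ≤ half_length then solution (n - 1) k
    else if solution (n - 1) (k - half_length) = "0" then "1" else "0"
termination_by n.toNat
decreasing_by all_goals omega

-- ===== PORT B =====
-- for-loop over range(n-2, -1, -1) as a foldl over PySem.List.pyRange with state (k, flips);
-- '1 << i' is ported as 2 ^ i.toNat, exact since every i produced by this range is ≥ 0
def solution_alt (n : Int) (k : Int) : String :=
  let st := (PySem.List.pyRange (n - 2) (-1) (-1)).foldl
    (fun (st : Int × Int) (i : Int) =>
      let half : Int := 2 ^ i.toNat
      if half < st.1 then (st.1 - half, 1 - st.2) else st)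
    (k, 0)
  if st.2 ≠ 0 then "1" else "0"

-- ===== PRECONDITION & SPEC =====
-- Pre_ excludes only n < 1, where Python A never returns (it recurses below the base case
-- until RecursionError); A returns on every n ≥ 1.
def Pre_solution (n : Int) (k : Int) : Prop := 1 ≤ n
instance (n : Int) (k : Int) : Decidable (Pre_solution n k) := by unfold Pre_solution; infer_instance
def pvWitness_solution : Int × Int := (3, 2)

def Spec_solution (n : Int) (k : Int) (out : String) : Prop := out = solution_alt n k
instance (n : Int) (k : Int) (out : String) : Decidable (Spec_solution n k out) := by unfold Spec_solution; infer_instance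

-- ===== CLAIM (what is proved, stated in full; the proofs are below) =====
def Claim_equal_solution : Prop := ∀ (n : Int) (k : Int), Dom_solution n k → Pre_solution n k → Spec_solution n k (solution n k)

-- ===== LEMMAS AND PROOFS =====

def flipStr (s : String) : String := if s = "0" then "1" else "0"

theorem sol01 (j : Nat) (k : Int) : solution ((j : Int) + 1) k = "0" ∨ solution ((j : Int) + 1) k = "1" := by
  induction j generalizing k with
  | zero => left; simp [solution]
  | succ j ih =>
    have hc : (((j + 1 : Nat)) : Int) + 1 = (j : Int) + 1 + 1 := by push_cast; ring
    rw [hc, solution]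
    have h1 : ((j : Int) + 1 + 1) ≠ 1 := by omega
    have h2 : ¬ ((j : Int) + 1 + 1) ≤ 1 := by omega
    have hred : ((j : Int) + 1 + 1 - 1) = (j : Int) + 1 := by ring
    simp only [if_neg h1, if_neg h2, hred]
    split_ifs with h3 h4
    · exact ih k
    · right; rfl
    · left; rfl

theorem flipStr_flipStr (j : Nat) (k : Int) : flipStr (flipStr (solution ((j : Int) + 1) k)) = solution ((j : Int) + 1) k := by
  rcases sol01 j k with h | h <;> rw [h] <;> rfl

theorem key (j : Nat) (k f : Int) (hf : f = 0 ∨ f = 1) :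
    (if ((PySem.List.pyRange ((j : Int) - 1) (-1) (-1)).foldl
        (fun (st : Int × Int) (i : Int) =>
          let half : Int := 2 ^ i.toNat
          if half < st.1 then (st.1 - half, 1 - st.2) else st)
        (k, f)).2 ≠ 0 then "1" else "0")
    = (if f = 1 then flipStr (solution ((j : Int) + 1) k) else solution ((j : Int) + 1) k) := by
  induction j generalizing k f with
  | zero =>
    have hnil : PySem.List.pyRange ((0 : Int) - 1) (-1) (-1) = [] := by
      simp [PySem.List.pyRange_neg_one_eq_nil]
    simp only [Nat.cast_zero, hnil, List.foldl_nil]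
    have : solution ((0 : Int) + 1) k = "0" := by simp [solution]
    rw [this]
    rcases hf with h | h <;> subst h <;> simp [flipStr]
  | succ j ih =>
    have hcons : PySem.List.pyRange (((j : Nat) + 1 : Int) - 1) (-1) (-1)
        = ((j : Int)) :: PySem.List.pyRange ((j : Int) - 1) (-1) (-1) := by
      have h1 : (((j : Nat) + 1 : Int) - 1) = (j : Int) := by push_cast; ring
      rw [h1, PySem.List.pyRange_neg_one_cons (by omega)]
    push_cast
    push_cast at hcons
    rw [hcons, List.foldl_cons]
    have htn : ((j : Int)).toNat = j := by omega
    -- unfold A one level at n = j + 2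
    have hn1 : ((j : Int) + 1 + 1) ≠ 1 := by omega
    have hn2 : ¬ ((j : Int) + 1 + 1) ≤ 1 := by omega
    have hsub : (((j : Int) + 1 + 1) - 2).toNat = j := by omega
    have hred : ((j : Int) + 1 + 1 - 1) = (j : Int) + 1 := by ring
    rw [solution]
    simp only [if_neg hn1, if_neg hn2, hsub, hred]
    by_cases hk : (2 : Int) ^ j < k
    · -- A takes the flip branch, B subtracts and toggles
      have hA : ¬ k ≤ (2 : Int) ^ j := by omega
      simp only [if_neg hA, htn, if_pos hk]
      have hf' : (1 - f = 0 ∨ 1 - f = 1) := by rcases hf with h | h <;> subst h <;> simp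
      rw [ih (k - 2 ^ j) (1 - f) hf']
      rcases hf with h | h <;> subst h
      · simp only [show (1 : Int) - 0 = 1 by ring, if_neg (by norm_num : ¬ (0 : Int) = 1)]
        rcases sol01 j (k - 2 ^ j) with hs | hs <;> rw [hs] <;> rfl
      · simp only [show (1 : Int) - 1 = 0 by ring, if_neg (by norm_num : ¬ (0 : Int) = 1)]
        have := flipStr_flipStr j (k - 2 ^ j)
        rcases sol01 j (k - 2 ^ j) with hs | hs <;> rw [hs] <;> rfl
    · have hA : k ≤ (2 : Int) ^ j := by omega
      simp only [if_pos hA, htn, if_neg hk]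
      exact ih k f hf

-- ===== VERDICT (by name: the statement is the Claim_ definition above) =====
theorem solution_spec : Claim_equal_solution := by
  intro n k _ hpre
  unfold Spec_solution solution_alt
  obtain ⟨j, hj⟩ : ∃ j : Nat, n = (j : Int) + 1 := ⟨(n - 1).toNat, by unfold Pre_solution at hpre; omega⟩
  subst hj
  have h2 : ((j : Int) + 1 - 2) = (j : Int) - 1 := by ring
  simp only [h2]
  have h := key j k 0 (Or.inl rfl)
  simp only [if_neg (by norm_num : ¬ (0 : Int) = 1)] at h
  rw [eq_comm] at h
  simpa [ne_eq] using h
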